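-- pv_equiv track=rewrite | github.com/Alvarado007/Discretas-codigos | parcialrecu1.py | recurrencia
-- ===== SOURCE A (Python) =====
-- def recurrencia(n):
--     if n == 0:
--         return 5
--     elif n == 1:
--         return 1
--     elif n == 2:
--         return -1
--     else:
--         return 3*recurrencia(n-1)-4*recurrencia(n-3)+n**2
-- ===== SOURCE B (Python) =====
-- def recurrencia(n):
--     if n == 0:
--         return 5
--     if n == 1:
--         return 1
--     if n == 2:
--         return -1
--     a, b, c = 5, 1, -1
--     for k in range(3, n + 1):
--         a, b, c = b, c, 3 * c - 4 * a + k * k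
--     return c
-- ===== Notes on version B (the rewrite author's own statement) =====
-- stated objective: faster
-- what changed: Replaces the naive exponential double recursion by a bottom-up loop keeping a rolling window of the last three values.
import Mathlib
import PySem

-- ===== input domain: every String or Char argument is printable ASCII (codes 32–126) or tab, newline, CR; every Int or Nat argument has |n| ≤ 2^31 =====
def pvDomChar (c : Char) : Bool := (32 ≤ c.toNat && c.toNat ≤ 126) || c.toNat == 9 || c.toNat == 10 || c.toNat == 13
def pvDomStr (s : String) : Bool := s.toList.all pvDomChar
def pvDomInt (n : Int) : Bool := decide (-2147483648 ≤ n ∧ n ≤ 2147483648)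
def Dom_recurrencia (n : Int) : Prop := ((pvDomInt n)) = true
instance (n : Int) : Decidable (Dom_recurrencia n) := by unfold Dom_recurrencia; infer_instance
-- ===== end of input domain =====

-- B replaces A's exponential double recursion by a bottom-up loop with a rolling window of the last three values (O(n)).
-- A diverges (RecursionError) for n < 0; Pre_ restricts to n ≥ 0.

-- ===== PORT A =====
-- A's recursion, step for step, on the Nat value of n (Python diverges for n < 0, excluded by Pre_).
def recurrenciaNat : Nat → Int
  | 0 => 5
  | 1 => 1
  | 2 => -1
  | (m + 3) => 3 * recurrenciaNat (m + 2) - 4 * recurrenciaNat m + ((m : Int) + 3) ^ 2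

def recurrencia (n : Int) : Int := recurrenciaNat n.toNat

-- ===== PORT B =====
def recurrencia_alt (n : Int) : Int :=
  if n == 0 then 5
  else if n == 1 then 1
  else if n == 2 then (-1)
  else
    let s := (PySem.List.pyRange 3 (n + 1) 1).foldl
      (fun (s : Int × Int × Int) k => (s.2.1, s.2.2, 3 * s.2.2 - 4 * s.1 + k * k)) (5, 1, -1)
    s.2.2

-- ===== PRECONDITION & SPEC =====
-- Pre_: A recurses forever (RecursionError) on negative n.
def Pre_recurrencia (n : Int) : Prop := 0 ≤ n
instance (n : Int) : Decidable (Pre_recurrencia n) := by unfold Pre_recurrencia; infer_instance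
def pvWitness_recurrencia : Int := 7

def Spec_recurrencia (n : Int) (out : Int) : Prop := out = recurrencia_alt n
instance (n : Int) (out : Int) : Decidable (Spec_recurrencia n out) := by unfold Spec_recurrencia; infer_instance

-- ===== CLAIM =====
def Claim_equal_recurrencia : Prop := ∀ (n : Int), Dom_recurrencia n → Pre_recurrencia n → Spec_recurrencia n (recurrencia n)

-- ===== LEMMAS AND PROOFS =====
-- Loop invariant: after folding over range(3, m+3), the state is (f(m), f(m+1), f(m+2)).
theorem fold_invariant (m : Nat) :
    (PySem.List.pyRange 3 ((m : Int) + 3) 1).foldl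
      (fun (s : Int × Int × Int) k => (s.2.1, s.2.2, 3 * s.2.2 - 4 * s.1 + k * k)) (5, 1, -1)
    = (recurrenciaNat m, recurrenciaNat (m + 1), recurrenciaNat (m + 2)) := by
  induction m with
  | zero => simp [PySem.List.pyRange_one_eq_nil, recurrenciaNat]
  | succ m ih =>
    have h : (((m + 1 : Nat)) : Int) + 3 = ((m : Int) + 3) + 1 := by push_cast; ring
    rw [h, PySem.List.pyRange_one_succ_right (by omega), List.foldl_append, ih]
    simp only [List.foldl_cons, List.foldl_nil]
    show _ = (recurrenciaNat (m + 1), recurrenciaNat (m + 2), recurrenciaNat (m + 3))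
    have : recurrenciaNat (m + 3) = 3 * recurrenciaNat (m + 2) - 4 * recurrenciaNat m + ((m : Int) + 3) ^ 2 := rfl
    rw [this]
    have hsq : ((m : Int) + 3) * ((m : Int) + 3) = ((m : Int) + 3) ^ 2 := by ring
    rw [hsq]

-- ===== VERDICT =====
theorem recurrencia_spec : Claim_equal_recurrencia := by
  intro n _ hpre
  unfold Spec_recurrencia recurrencia recurrencia_alt
  by_cases h0 : n = 0
  · subst h0; decide
  by_cases h1 : n = 1
  · subst h1; decide
  by_cases h2 : n = 2
  · subst h2; decide
  · simp only [beq_iff_eq, h0, h1, h2, if_false]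
    have hn3 : 3 ≤ n := by unfold Pre_recurrencia at hpre; omega
    obtain ⟨m, hm⟩ : ∃ m : Nat, n = (m : Int) + 3 := ⟨(n - 3).toNat, by omega⟩
    subst hm
    have hn : ((m : Int) + 3).toNat = m + 3 := by omega
    have h : ((m : Int) + 3) + 1 = ((m + 1 : Nat) : Int) + 3 := by push_cast; ring
    rw [hn, h, fold_invariant]
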